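-- pv_equiv track=rewrite | github.com/vasliddinasronbekov/crm | backend/student_profile/payment_reconciliation.py | _map_provider_state_to_local_status
-- ===== SOURCE A (Python) =====
-- def _map_provider_state_to_local_status(candidate_states: list[str]) -> str:
--     failed_tokens = {'failed', 'cancelled', 'canceled', 'error', 'rejected', '-1', '-2', '4'}
--     paid_tokens = {'paid', 'success', 'succeeded', 'completed', 'done', '2'}
--     pending_tokens = {'pending', 'processing', 'created', 'new', 'in_progress', '0', '1'}
--
--     for state in candidate_states:
--         if state in failed_tokens:
--             return 'failed'
--     for state in candidate_states:
--         if state in paid_tokens: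
--             return 'paid'
--     for state in candidate_states:
--         if state in pending_tokens:
--             return 'pending'
--     return 'unknown'
-- ===== SOURCE B (Python) =====
-- def _map_provider_state_to_local_status(candidate_states: list[str]) -> str:
--     failed_tokens = {'failed', 'cancelled', 'canceled', 'error', 'rejected', '-1', '-2', '4'}
--     paid_tokens = {'paid', 'success', 'succeeded', 'completed', 'done', '2'}
--     pending_tokens = {'pending', 'processing', 'created', 'new', 'in_progress', '0', '1'}
--
--     found_paid = False
--     found_pending = False
--     for state in candidate_states:
--         if state in failed_tokens:
--             return 'failed'
--         if state in paid_tokens: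
--             found_paid = True
--         elif state in pending_tokens:
--             found_pending = True
--     if found_paid:
--         return 'paid'
--     if found_pending:
--         return 'pending'
--     return 'unknown'
-- ===== Notes on version B (the rewrite author's own statement) =====
-- stated objective: alternative
-- what changed: Replaces A's three successive scans of the list with a single pass that returns 'failed' immediately and otherwise accumulates found_paid/found_pending flags, deciding paid > pending > unknown after the loop.
import Mathlib
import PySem

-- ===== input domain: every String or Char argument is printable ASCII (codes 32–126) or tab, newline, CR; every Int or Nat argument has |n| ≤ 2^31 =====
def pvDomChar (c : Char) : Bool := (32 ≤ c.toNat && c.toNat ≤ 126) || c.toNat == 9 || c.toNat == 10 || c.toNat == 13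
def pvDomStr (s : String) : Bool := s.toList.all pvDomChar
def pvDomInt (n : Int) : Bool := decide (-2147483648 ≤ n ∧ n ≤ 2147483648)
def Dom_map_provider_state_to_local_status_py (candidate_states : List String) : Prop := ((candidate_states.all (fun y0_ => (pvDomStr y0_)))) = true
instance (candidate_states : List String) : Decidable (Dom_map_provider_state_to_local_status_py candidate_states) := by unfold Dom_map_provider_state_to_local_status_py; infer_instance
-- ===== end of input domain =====

-- B replaces A's three successive scans with one pass keeping found_paid/found_pending flags (same O(n) cost, alternative decomposition).


-- ===== PORT A =====
def pvFailedTokens : PySem.Set String :=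
  PySem.Set.ofList ["failed", "cancelled", "canceled", "error", "rejected", "-1", "-2", "4"]
def pvPaidTokens : PySem.Set String :=
  PySem.Set.ofList ["paid", "success", "succeeded", "completed", "done", "2"]
def pvPendingTokens : PySem.Set String :=
  PySem.Set.ofList ["pending", "processing", "created", "new", "in_progress", "0", "1"]

-- first loop of A: return 'failed' on a failed token
def pvALoop1 : List String → Option String
  | [] => none
  | s :: t => if pvFailedTokens.contains s then some "failed" else pvALoop1 t
-- second loop of A
def pvALoop2 : List String → Option String
  | [] => none
  | s :: t => if pvPaidTokens.contains s then some "paid" else pvALoop2 t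
-- third loop of A
def pvALoop3 : List String → Option String
  | [] => none
  | s :: t => if pvPendingTokens.contains s then some "pending" else pvALoop3 t

def map_provider_state_to_local_status_py (candidate_states : List String) : String :=
  match pvALoop1 candidate_states with
  | some r => r
  | none =>
    match pvALoop2 candidate_states with
    | some r => r
    | none =>
      match pvALoop3 candidate_states with
      | some r => r
      | none => "unknown"

-- ===== PORT B =====
-- single pass with two flags; early return on a failed token
def pvBLoop : List String → Bool → Bool → String
  | [], foundPaid, foundPending =>
    if foundPaid then "paid" else if foundPending then "pending" else "unknown"
  | s :: t, foundPaid, foundPending =>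
    if pvFailedTokens.contains s then "failed"
    else if pvPaidTokens.contains s then pvBLoop t true foundPending
    else if pvPendingTokens.contains s then pvBLoop t foundPaid true
    else pvBLoop t foundPaid foundPending

def map_provider_state_to_local_status_py_alt (candidate_states : List String) : String :=
  pvBLoop candidate_states false false

-- ===== PRECONDITION & SPEC =====
def Spec_map_provider_state_to_local_status_py (candidate_states : List String) (out : String) : Prop := out = map_provider_state_to_local_status_py_alt candidate_states
instance (candidate_states : List String) (out : String) : Decidable (Spec_map_provider_state_to_local_status_py candidate_states out) := by unfold Spec_map_provider_state_to_local_status_py; infer_instance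

-- ===== CLAIM (what is proved, stated in full; the proofs are below) =====
def Claim_equal_map_provider_state_to_local_status_py : Prop := ∀ (candidate_states : List String), Dom_map_provider_state_to_local_status_py candidate_states → Spec_map_provider_state_to_local_status_py candidate_states (map_provider_state_to_local_status_py candidate_states)

-- ===== LEMMAS AND PROOFS =====
theorem pvALoop1_char (l : List String) :
    pvALoop1 l = if l.any (fun s => pvFailedTokens.contains s) then some "failed" else none := by
  induction l with
  | nil => rfl
  | cons s t ih => simp [pvALoop1, ih]; split_ifs <;> simp_all <;> tauto

theorem pvALoop2_char (l : List String) :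
    pvALoop2 l = if l.any (fun s => pvPaidTokens.contains s) then some "paid" else none := by
  induction l with
  | nil => rfl
  | cons s t ih => simp [pvALoop2, ih]; split_ifs <;> simp_all <;> tauto

theorem pvALoop3_char (l : List String) :
    pvALoop3 l = if l.any (fun s => pvPendingTokens.contains s) then some "pending" else none := by
  induction l with
  | nil => rfl
  | cons s t ih => simp [pvALoop3, ih]; split_ifs <;> simp_all <;> tauto

theorem pvBLoop_char (l : List String) : ∀ (fp fpd : Bool),
    pvBLoop l fp fpd =
      if l.any (fun s => pvFailedTokens.contains s) then "failed"
      else if fp || l.any (fun s => pvPaidTokens.contains s) then "paid"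
      else if fpd || l.any (fun s => pvPendingTokens.contains s) then "pending"
      else "unknown" := by
  induction l with
  | nil => intro fp fpd; simp [pvBLoop]
  | cons s t ih =>
    intro fp fpd
    simp only [pvBLoop, List.any_cons]
    by_cases h1 : s ∈ pvFailedTokens
    · simp [h1]
    · by_cases h2 : s ∈ pvPaidTokens
      · simp [h1, h2, ih]
      · by_cases h3 : s ∈ pvPendingTokens <;> simp [h1, h2, h3, ih]

-- ===== VERDICT (by name: the statement is the Claim_ definition above) =====
theorem map_provider_state_to_local_status_py_spec : Claim_equal_map_provider_state_to_local_status_py := by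
  intro l _
  show map_provider_state_to_local_status_py l = map_provider_state_to_local_status_py_alt l
  rw [map_provider_state_to_local_status_py, map_provider_state_to_local_status_py_alt,
    pvALoop1_char, pvALoop2_char, pvALoop3_char, pvBLoop_char]
  split_ifs <;> simp_all <;> tauto
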